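-- pv_equiv track=rewrite | github.com/tmmoond8/python_algorithm | textbook/coin.py | find_coin
-- ===== SOURCE A (Python) =====
-- def find_coin(a, start, end):
--   lower = upper = 0
--   i = start
--   mid = (start + end) // 2
--   while(i <= end):
--     if((start + end) % 2 == 0 and i == mid):
--       i += 1
--       continue
--     if(i <= mid):
--       lower += a[i]
--     else :
--       upper += a[i]
--     i += 1
--   if(lower == upper):
--     return mid
--   elif(lower < upper):
--     if(end - start < 3):
--       return start
--     return find_coin(a, start, mid)
--   else :
--     if(end - start < 3):
--       return end
--     return find_coin(a, mid + 1, end)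
-- ===== SOURCE B (Python) =====
-- def find_coin(a, start, end):
--     # Iterative halving; compares halves via a single pairwise difference loop.
--     while True:
--         mid = (start + end) // 2
--         diff = 0
--         for k in range((end - start + 1) // 2):
--             diff += a[start + k] - a[end - k]
--         if diff == 0:
--             return mid
--         if diff < 0:
--             if end - start < 3:
--                 return start
--             end = mid
--         else:
--             if end - start < 3:
--                 return end
--             start = mid + 1
-- ===== Notes on version B (the rewrite author's own statement) =====
-- stated objective: alternative
-- what changed: Recursive halving with a two-accumulator index scan (skipping the midpoint on even parity) is replaced by an iterative while-loop whose halves are compared by a single pairwise difference sum over the first/last floor(n/2) elements, so the midpoint-skip parity rule disappears.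
import Mathlib
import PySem

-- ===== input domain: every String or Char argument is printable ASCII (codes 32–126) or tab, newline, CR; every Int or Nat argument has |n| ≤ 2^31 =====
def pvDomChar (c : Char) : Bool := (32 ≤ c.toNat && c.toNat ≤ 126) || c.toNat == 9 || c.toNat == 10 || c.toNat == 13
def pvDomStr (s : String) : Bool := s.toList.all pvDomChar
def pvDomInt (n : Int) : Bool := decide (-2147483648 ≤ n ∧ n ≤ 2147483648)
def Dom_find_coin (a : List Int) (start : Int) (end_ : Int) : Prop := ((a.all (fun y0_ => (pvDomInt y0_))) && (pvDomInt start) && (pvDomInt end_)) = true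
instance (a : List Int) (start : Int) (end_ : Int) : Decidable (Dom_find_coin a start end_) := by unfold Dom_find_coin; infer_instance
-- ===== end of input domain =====

-- B replaces A's recursion with an iterative loop and replaces the two-accumulator
-- midpoint-skipping scan by a single pairwise difference sum (objective: alternative).

-- ===== PORT A =====
-- the while loop of A: i scans start..end_, accumulating lower/upper, skipping mid on even parity
def find_coin_loop (a : List Int) (start end_ mid : Int) (i lower upper : Int) : Int × Int :=
  if _h : i ≤ end_ then
    if PySem.Int.mod (start + end_) 2 = 0 ∧ i = mid then
      find_coin_loop a start end_ mid (i + 1) lower upper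
    else if i ≤ mid then
      find_coin_loop a start end_ mid (i + 1) (lower + PySem.List.pyGetD a i 0) upper
    else
      find_coin_loop a start end_ mid (i + 1) lower (upper + PySem.List.pyGetD a i 0)
  else (lower, upper)
termination_by (end_ + 1 - i).toNat
decreasing_by all_goals omega

def find_coin (a : List Int) (start : Int) (end_ : Int) : Int :=
  let lu := find_coin_loop a start end_ (PySem.Int.floordiv (start + end_) 2) start 0 0
  if lu.1 = lu.2 then PySem.Int.floordiv (start + end_) 2
  else if lu.1 < lu.2 then
    if _h3 : end_ - start < 3 then start
    else find_coin a start (PySem.Int.floordiv (start + end_) 2)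
  else
    if _h3 : end_ - start < 3 then end_
    else find_coin a (PySem.Int.floordiv (start + end_) 2 + 1) end_
termination_by (end_ - start).toNat
decreasing_by
  all_goals
    rw [PySem.Int.floordiv_eq_ediv_of_pos (by omega : (0:Int) < 2)] at *
    omega

-- ===== PORT B =====
-- the 'for k in range(n): diff += a[start+k] - a[end-k]' loop of Source B, k ascending
def find_coin_alt_diff (a : List Int) (s e : Int) : Nat → Int
  | 0 => 0
  | Nat.succ n => find_coin_alt_diff a s e n + (PySem.List.pyGetD a (s + n) 0 - PySem.List.pyGetD a (e - n) 0)

-- the 'while True' loop of Source B: state (start, end_), each pass either returns or shrinks the range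
def find_coin_alt (a : List Int) (start : Int) (end_ : Int) : Int :=
  let mid := PySem.Int.floordiv (start + end_) 2
  let diff := find_coin_alt_diff a start end_ (PySem.Int.floordiv (end_ - start + 1) 2).toNat
  if diff = 0 then mid
  else if diff < 0 then
    if _h3 : end_ - start < 3 then start else find_coin_alt a start mid
  else
    if _h3 : end_ - start < 3 then end_ else find_coin_alt a (mid + 1) end_
termination_by (end_ - start).toNat
decreasing_by
  all_goals
    rw [PySem.Int.floordiv_eq_ediv_of_pos (by omega : (0:Int) < 2)] at *
    omega

-- ===== PRECONDITION & SPEC =====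
-- Pre_: exactly the inputs on which A returns (no IndexError): whenever start < end_ the
-- whole scanned index range start..end_ must be valid Python indices of a.
def Pre_find_coin (a : List Int) (start : Int) (end_ : Int) : Prop :=
  start < end_ → (-(a.length : Int) ≤ start ∧ end_ < (a.length : Int))
instance (a : List Int) (start : Int) (end_ : Int) : Decidable (Pre_find_coin a start end_) := by
  unfold Pre_find_coin; infer_instance
def pvWitness_find_coin : List Int × Int × Int := ([1, 1, 1, 2, 1], 0, 4)

def Spec_find_coin (a : List Int) (start : Int) (end_ : Int) (out : Int) : Prop := out = find_coin_alt a start end_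
instance (a : List Int) (start : Int) (end_ : Int) (out : Int) : Decidable (Spec_find_coin a start end_ out) := by unfold Spec_find_coin; infer_instance

-- ===== CLAIM (what is proved, stated in full; the proofs are below) =====
def Claim_equal_find_coin : Prop := ∀ (a : List Int) (start : Int) (end_ : Int), Dom_find_coin a start end_ → Pre_find_coin a start end_ → Spec_find_coin a start end_ (find_coin a start end_)

-- ===== LEMMAS AND PROOFS =====

-- a[i] as the ports read it
def pvG (a : List Int) (i : Int) : Int := PySem.List.pyGetD a i 0

-- sum of a[lo], a[lo+1], …, a[lo+n-1]
def pvS (a : List Int) (lo : Int) : Nat → Int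
  | 0 => 0
  | Nat.succ n => pvG a lo + pvS a (lo + 1) n

theorem pvS_succ_right (a : List Int) (lo : Int) (n : Nat) :
    pvS a lo (n + 1) = pvS a lo n + pvG a (lo + n) := by
  induction n generalizing lo with
  | zero => simp [pvS]
  | succ k ih =>
    have h1 : pvS a lo (k + 1 + 1) = pvG a lo + pvS a (lo + 1) (k + 1) := rfl
    have h2 : pvS a lo (k + 1) = pvG a lo + pvS a (lo + 1) k := rfl
    have h3 : (lo + 1 + (k : Int)) = lo + ((k + 1 : Nat) : Int) := by push_cast; ring
    rw [h1, ih (lo + 1), h2, h3]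
    ring

theorem diff_eq_S (a : List Int) (s e : Int) (n : Nat) :
    find_coin_alt_diff a s e n = pvS a s n - pvS a (e - n + 1) n := by
  induction n with
  | zero => simp [find_coin_alt_diff, pvS]
  | succ k ih =>
    have h1 : pvS a (e - (↑(k + 1) : Int) + 1) (k + 1) = pvG a (e - k) + pvS a (e - k + 1) k := by
      have : (e - (↑(k + 1) : Int) + 1) = e - k - 1 + 1 := by push_cast; ring
      rw [this]
      simp only [pvS]
      congr 2 <;> ring
    rw [pvS_succ_right]
    simp only [find_coin_alt_diff, ih, h1, pvG]
    ring

theorem loop_spec (a : List Int) (s e mid : Int)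
    (hmid : mid = PySem.Int.floordiv (s + e) 2) (_hse : s ≤ e) :
    ∀ (n : Nat) (i lo up : Int), (e + 1 - i).toNat ≤ n → s ≤ i →
      find_coin_loop a s e mid i lo up =
        (lo + (if i ≤ (if PySem.Int.mod (s + e) 2 = 0 then mid - 1 else mid)
                then pvS a i ((if PySem.Int.mod (s + e) 2 = 0 then mid - 1 else mid) - i + 1).toNat else 0),
         up + (if max i (mid + 1) ≤ e then pvS a (max i (mid + 1)) (e - max i (mid + 1) + 1).toNat else 0)) := by
  have hm : 2 * mid ≤ s + e ∧ s + e < 2 * mid + 2 := by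
    rw [hmid, PySem.Int.floordiv_eq_ediv_of_pos (by omega : (0:Int) < 2)]; omega
  have hmod : PySem.Int.mod (s + e) 2 = 0 ↔ s + e = 2 * mid := by
    rw [PySem.Int.mod_eq_emod_of_pos (by omega : (0:Int) < 2)]; omega
  intro n
  induction n with
  | zero =>
    intro i lo up hn hsi
    have hie : e < i := by omega
    rw [find_coin_loop]
    rw [dif_neg (by omega)]
    have h1 : ¬ i ≤ (if PySem.Int.mod (s + e) 2 = 0 then mid - 1 else mid) := by
      split <;> omega
    rw [if_neg h1, if_neg (by omega)]
    simp
  | succ k ih =>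
    intro i lo up hn hsi
    by_cases hie : i ≤ e
    · rw [find_coin_loop, dif_pos hie]
      by_cases hsk : PySem.Int.mod (s + e) 2 = 0 ∧ i = mid
      · -- skip the midpoint
        rw [if_pos hsk, ih (i + 1) lo up (by omega) (by omega)]
        have heq : s + e = 2 * mid := hmod.mp hsk.1
        have h1 : ¬ i ≤ (if PySem.Int.mod (s + e) 2 = 0 then mid - 1 else mid) := by
          rw [if_pos hsk.1]; omega
        have h2 : ¬ i + 1 ≤ (if PySem.Int.mod (s + e) 2 = 0 then mid - 1 else mid) := by
          rw [if_pos hsk.1]; omega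
        rw [if_neg h1, if_neg h2]
        have h3 : max (i + 1) (mid + 1) = max i (mid + 1) := by omega
        rw [h3]
      · rw [if_neg hsk]
        by_cases him : i ≤ mid
        · rw [if_pos him, ih (i + 1) _ up (by omega) (by omega)]
          have hmt : i ≤ (if PySem.Int.mod (s + e) 2 = 0 then mid - 1 else mid) := by
            split
            · rename_i hev
              have : i ≠ mid := fun hc => hsk ⟨hev, hc⟩
              omega
            · omega
          rw [if_pos hmt]
          set mtop := (if PySem.Int.mod (s + e) 2 = 0 then mid - 1 else mid) with hmtop
          have hmax : max (i + 1) (mid + 1) = max i (mid + 1) := by omega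
          rw [hmax]
          refine Prod.ext ?_ rfl
          simp only
          by_cases hi1 : i + 1 ≤ mtop
          · rw [if_pos hi1]
            have hc : (mtop - i + 1).toNat = (mtop - (i+1) + 1).toNat + 1 := by omega
            rw [hc]
            simp only [pvS, pvG]
            ring
          · rw [if_neg hi1]
            have hc : (mtop - i + 1).toNat = 1 := by omega
            rw [hc]
            simp only [pvS, pvG]
            ring
        · rw [if_neg him, ih (i + 1) lo _ (by omega) (by omega)]
          have hmt1 : ¬ i ≤ (if PySem.Int.mod (s + e) 2 = 0 then mid - 1 else mid) := by
            split <;> omega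
          have hmt2 : ¬ i + 1 ≤ (if PySem.Int.mod (s + e) 2 = 0 then mid - 1 else mid) := by
            split <;> omega
          rw [if_neg hmt1, if_neg hmt2]
          have hmx1 : max i (mid + 1) = i := by omega
          have hmx2 : max (i + 1) (mid + 1) = i + 1 := by omega
          rw [hmx1, hmx2]
          refine Prod.ext rfl ?_
          simp only
          rw [if_pos hie]
          by_cases hi1 : i + 1 ≤ e
          · rw [if_pos hi1]
            have hc : (e - i + 1).toNat = (e - (i+1) + 1).toNat + 1 := by omega
            rw [hc]
            simp only [pvS, pvG]
            ring
          · rw [if_neg hi1]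
            have hc : (e - i + 1).toNat = 1 := by omega
            rw [hc]
            simp only [pvS, pvG]
            ring
    · rw [find_coin_loop, dif_neg hie]
      have h1 : ¬ i ≤ (if PySem.Int.mod (s + e) 2 = 0 then mid - 1 else mid) := by
        split <;> omega
      rw [if_neg h1, if_neg (by omega)]
      simp

-- main equivalence, by induction on a bound for (end_ - start).toNat
theorem main_eq (a : List Int) : ∀ (n : Nat) (s e : Int), (e - s).toNat ≤ n →
    find_coin a s e = find_coin_alt a s e := by
  intro n
  induction n with
  | zero =>
    intro s e hn
    -- here e ≤ s, so no recursion happens on either side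
    have hes : e ≤ s := by omega
    by_cases hse : s ≤ e
    · have heq : s = e := by omega
      subst heq
      rw [find_coin, find_coin_alt]
      have hmid : PySem.Int.floordiv (s + s) 2 = s := by
        rw [PySem.Int.floordiv_eq_ediv_of_pos (by omega : (0:Int) < 2)]; omega
      have hmod : PySem.Int.mod (s + s) 2 = 0 := by
        rw [PySem.Int.mod_eq_emod_of_pos (by omega : (0:Int) < 2)]; omega
      have hloop : find_coin_loop a s s (PySem.Int.floordiv (s + s) 2) s 0 0 = (0, 0) := by
        rw [find_coin_loop, dif_pos le_rfl, if_pos ⟨hmod, hmid.symm⟩,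
            find_coin_loop, dif_neg (by omega)]
      have hdiff : (PySem.Int.floordiv (s - s + 1) 2).toNat = 0 := by
        rw [PySem.Int.floordiv_eq_ediv_of_pos (by omega : (0:Int) < 2)]; omega
      rw [hloop, hdiff]
      simp [find_coin_alt_diff]
    · rw [find_coin, find_coin_alt]
      have hloop : find_coin_loop a s e (PySem.Int.floordiv (s + e) 2) s 0 0 = (0, 0) := by
        rw [find_coin_loop, dif_neg (by omega)]
      have hdiff : (PySem.Int.floordiv (e - s + 1) 2).toNat = 0 := by
        rw [PySem.Int.floordiv_eq_ediv_of_pos (by omega : (0:Int) < 2)]; omega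
      rw [hloop, hdiff]
      simp [find_coin_alt_diff]
  | succ k ih =>
    intro s e hn
    by_cases hse : s ≤ e
    · set mid := PySem.Int.floordiv (s + e) 2 with hmid
      have hm : 2 * mid ≤ s + e ∧ s + e < 2 * mid + 2 := by
        rw [hmid, PySem.Int.floordiv_eq_ediv_of_pos (by omega : (0:Int) < 2)]; omega
      set h := (PySem.Int.floordiv (e - s + 1) 2).toNat with hh
      have hhc : 2 * (h : Int) ≤ e - s + 1 ∧ e - s + 1 < 2 * (h : Int) + 2 := by
        rw [hh, PySem.Int.floordiv_eq_ediv_of_pos (by omega : (0:Int) < 2)]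
        have : (0:Int) ≤ (e - s + 1) / 2 := by omega
        omega
      have hloop := loop_spec a s e mid hmid hse (e + 1 - s).toNat s 0 0 le_rfl le_rfl
      -- lower accumulator = pvS a s h
      have hlow : (0 : Int) + (if s ≤ (if PySem.Int.mod (s + e) 2 = 0 then mid - 1 else mid)
                then pvS a s ((if PySem.Int.mod (s + e) 2 = 0 then mid - 1 else mid) - s + 1).toNat else 0)
              = pvS a s h := by
        have hmod : PySem.Int.mod (s + e) 2 = 0 ↔ s + e = 2 * mid := by
          rw [PySem.Int.mod_eq_emod_of_pos (by omega : (0:Int) < 2)]; omega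
        by_cases hev : PySem.Int.mod (s + e) 2 = 0
        · rw [if_pos hev]
          have heq : s + e = 2 * mid := hmod.mp hev
          by_cases hsm : s ≤ mid - 1
          · rw [if_pos hsm]
            have : (mid - 1 - s + 1).toNat = h := by omega
            rw [this]; ring
          · rw [if_neg hsm]
            have : h = 0 := by omega
            rw [this]; simp [pvS]
        · rw [if_neg hev]
          have hne : s + e ≠ 2 * mid := fun hc => hev (hmod.mpr hc)
          have hsm : s ≤ mid := by omega
          rw [if_pos hsm]
          have : (mid - s + 1).toNat = h := by omega
          rw [this]; ring
      -- upper accumulator = pvS a (mid+1) h, and  mid + 1 = e - h + 1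
      have hmax : max s (mid + 1) = mid + 1 := by omega
      have hemid : e - (h : Int) = mid := by
        have hmod : PySem.Int.mod (s + e) 2 = 0 ∨ PySem.Int.mod (s + e) 2 = 1 := by
          rw [PySem.Int.mod_eq_emod_of_pos (by omega : (0:Int) < 2)]; omega
        rcases hmod with hv | hv <;>
          · have := (by rw [PySem.Int.mod_eq_emod_of_pos (by omega : (0:Int) < 2)] at hv; omega :
              s + e = 2 * mid ∨ s + e = 2 * mid + 1)
            omega
      have hup : (0 : Int) + (if max s (mid + 1) ≤ e then pvS a (max s (mid + 1)) (e - max s (mid + 1) + 1).toNat else 0)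
              = pvS a (e - (h:Int) + 1) h := by
        rw [hmax]
        by_cases hme : mid + 1 ≤ e
        · rw [if_pos hme]
          have h1 : (e - (mid + 1) + 1).toNat = h := by omega
          rw [h1, hemid]
          ring
        · rw [if_neg hme]
          have h0 : h = 0 := by omega
          rw [h0]; simp [pvS]
      have hdiffeq : find_coin_alt_diff a s e h = pvS a s h - pvS a (e - (h:Int) + 1) h :=
        diff_eq_S a s e h
      rw [find_coin, find_coin_alt]
      rw [← hmid, ← hh, hloop, hdiffeq, ← hlow, ← hup]
      set L := (0 : Int) + (if s ≤ (if PySem.Int.mod (s + e) 2 = 0 then mid - 1 else mid)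
                then pvS a s ((if PySem.Int.mod (s + e) 2 = 0 then mid - 1 else mid) - s + 1).toNat else 0)
      set U := (0 : Int) + (if max s (mid + 1) ≤ e then pvS a (max s (mid + 1)) (e - max s (mid + 1) + 1).toNat else 0)
      simp only
      by_cases h0 : L = U
      · rw [if_pos h0, if_pos (by omega : L - U = 0)]
      · rw [if_neg h0, if_neg (by omega : ¬ L - U = 0)]
        by_cases hlt : L < U
        · rw [if_pos hlt, if_pos (by omega : L - U < 0)]
          by_cases h3 : e - s < 3
          · rw [dif_pos h3, dif_pos h3]
          · rw [dif_neg h3, dif_neg h3]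
            exact ih s mid (by omega)
        · rw [if_neg hlt, if_neg (by omega : ¬ L - U < 0)]
          by_cases h3 : e - s < 3
          · rw [dif_pos h3, dif_pos h3]
          · rw [dif_neg h3, dif_neg h3]
            exact ih (mid + 1) e (by omega)
    · rw [find_coin, find_coin_alt]
      have hloop : find_coin_loop a s e (PySem.Int.floordiv (s + e) 2) s 0 0 = (0, 0) := by
        rw [find_coin_loop, dif_neg (by omega)]
      have hdiff : (PySem.Int.floordiv (e - s + 1) 2).toNat = 0 := by
        rw [PySem.Int.floordiv_eq_ediv_of_pos (by omega : (0:Int) < 2)]; omega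
      rw [hloop, hdiff]
      simp [find_coin_alt_diff]

-- ===== VERDICT (by name: the statement is the Claim_ definition above) =====
theorem find_coin_spec : Claim_equal_find_coin := by
  intro a s e _ _
  unfold Spec_find_coin
  exact main_eq a (e - s).toNat s e le_rfl
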